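-- pv_equiv track=rewrite | github.com/dannyanny1212/danny-toolkit | ingest.py | _strategy_code
-- ===== SOURCE A (Python) =====
-- def _strategy_code(text):
--     """Splitsen op class/def definities."""
--     lines = text.split("\n")
--     chunks = []
--     current_chunk = []
--
--     for line in lines:
--         if line.strip().startswith(
--             ("def ", "class ", "@")
--         ):
--             if current_chunk:
--                 chunks.append(
--                     "\n".join(current_chunk)
--                 )
--                 current_chunk = []
--         current_chunk.append(line)
--
--         # Breek af als chunk te groot wordt
--         if len(current_chunk) > 150:
--             chunks.append(
--                 "\n".join(current_chunk)
--             )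
--             current_chunk = []
--
--     if current_chunk:
--         chunks.append("\n".join(current_chunk))
--     return chunks
-- ===== SOURCE B (Python) =====
-- def _strategy_code(text):
--     """Splitsen op class/def definities."""
--     lines = text.split("\n")
--     # Phase 1: segment the lines at every def/class/decorator boundary.
--     segments = []
--     seg = []
--     for line in lines:
--         if line.strip().startswith(("def ", "class ", "@")):
--             if seg:
--                 segments.append(seg)
--             seg = [line]
--         else:
--             seg.append(line)
--     if seg:
--         segments.append(seg)
--     # Phase 2: cut each segment into pieces of at most 151 lines.
--     return [
--         "\n".join(seg[i:i + 151])
--         for seg in segments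
--         for i in range(0, len(seg), 151)
--     ]
-- ===== Notes on version B (the rewrite author's own statement) =====
-- stated objective: alternative
-- what changed: Replaces A's single fused loop (flush-on-boundary and flush-on-size inside one pass over a shared accumulator) with a two-phase decomposition: first segment the lines at def/class/@ boundaries, then slice each segment independently into pieces of at most 151 lines.
import Mathlib
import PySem

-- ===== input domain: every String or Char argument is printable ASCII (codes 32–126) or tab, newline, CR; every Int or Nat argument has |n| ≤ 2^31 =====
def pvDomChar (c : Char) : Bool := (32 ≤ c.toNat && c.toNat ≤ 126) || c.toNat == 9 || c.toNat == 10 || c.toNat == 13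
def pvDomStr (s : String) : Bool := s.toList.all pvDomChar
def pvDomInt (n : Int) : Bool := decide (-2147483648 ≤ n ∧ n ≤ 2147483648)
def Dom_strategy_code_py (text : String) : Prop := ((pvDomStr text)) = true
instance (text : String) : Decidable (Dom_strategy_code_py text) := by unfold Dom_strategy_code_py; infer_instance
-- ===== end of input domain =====

-- B replaces A's single fused loop with a two-phase decomposition (segment at
-- def/class/@ boundaries, then slice each segment into pieces of ≤ 151 lines);
-- objective: alternative structure, same cost, proved to return the same list.


-- ===== PORT A =====
-- line.strip().startswith(("def ", "class ", "@"))
def pvBoundary (line : String) : Bool :=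
  PySem.Str.startswith (PySem.Str.strip line) "def " ||
  PySem.Str.startswith (PySem.Str.strip line) "class " ||
  PySem.Str.startswith (PySem.Str.strip line) "@"

-- "\n".join(xs)
def pvJoin (xs : List String) : String := PySem.Str.join "\n" xs

-- one iteration of A's for-loop over (chunks, current_chunk)
def pvStepA (st : List String × List String) (line : String) : List String × List String :=
  let st := if pvBoundary line then
              (if st.2 ≠ [] then (st.1 ++ [pvJoin st.2], ([] : List String)) else st)
            else st
  let cur := st.2 ++ [line]
  if cur.length > 150 then (st.1 ++ [pvJoin cur], []) else (st.1, cur)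

def strategy_code_py (text : String) : List String :=
  let lines := (PySem.Str.split? text "\n").getD []
  let st := lines.foldl pvStepA ([], [])
  if st.2 ≠ [] then st.1 ++ [pvJoin st.2] else st.1

-- ===== PORT B =====
-- the inner range(0, len(seg), 151) slice loop of Source B's comprehension
def pvPieces (seg : List String) : List String :=
  if seg = [] then [] else pvJoin (seg.take 151) :: pvPieces (seg.drop 151)
termination_by seg.length
decreasing_by
  rename_i h
  have : 0 < seg.length := List.length_pos_iff.mpr h
  simp only [List.length_drop]; omega

-- one iteration of Source B's phase-1 segmentation loop over (segments, seg)
def pvStepB (st : List (List String) × List String) (line : String) :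
    List (List String) × List String :=
  if pvBoundary line then
    ((if st.2 ≠ [] then st.1 ++ [st.2] else st.1), [line])
  else (st.1, st.2 ++ [line])

def strategy_code_py_alt (text : String) : List String :=
  let lines := (PySem.Str.split? text "\n").getD []
  let st := lines.foldl pvStepB ([], [])
  let segs := if st.2 ≠ [] then st.1 ++ [st.2] else st.1
  segs.flatMap pvPieces

-- ===== PRECONDITION & SPEC =====
def Spec_strategy_code_py (text : String) (out : List String) : Prop := out = strategy_code_py_alt text
instance (text : String) (out : List String) : Decidable (Spec_strategy_code_py text out) := by unfold Spec_strategy_code_py; infer_instance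

-- ===== CLAIM (what is proved, stated in full; the proofs are below) =====
def Claim_equal_strategy_code_py : Prop := ∀ (text : String), Dom_strategy_code_py text → Spec_strategy_code_py text (strategy_code_py text)

-- ===== LEMMAS AND PROOFS =====

lemma pvPieces_nil : pvPieces [] = [] := by
  rw [pvPieces]; simp

lemma pvPieces_small (cur : List String) (h : cur.length ≤ 150) :
    pvPieces cur = if cur = [] then [] else [pvJoin cur] := by
  rw [pvPieces]
  by_cases hc : cur = []
  · simp [hc]
  · simp only [hc, if_false]
    rw [List.take_of_length_le (by omega), List.drop_eq_nil_of_le (by omega), pvPieces_nil]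

lemma pvPieces_block (b rest : List String) (hb : b.length = 151) :
    pvPieces (b ++ rest) = pvJoin b :: pvPieces rest := by
  rw [pvPieces]
  have hne : b ++ rest ≠ [] := by
    intro h
    have := congrArg List.length h
    simp [hb] at this
  rw [if_neg hne, ← hb, List.take_left, List.drop_left]

lemma pvPieces_flatten (done : List (List String)) (h : ∀ b ∈ done, b.length = 151)
    (cur : List String) :
    pvPieces (done.flatten ++ cur) = done.map pvJoin ++ pvPieces cur := by
  induction done with
  | nil => simp
  | cons b t ih =>
    have hb : b.length = 151 := h b (by simp)
    have ht : ∀ x ∈ t, x.length = 151 := fun x hx => h x (by simp [hx])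
    rw [List.flatten_cons, List.append_assoc, pvPieces_block b _ hb, ih ht]
    simp

-- close-out of a segment: appending the (possibly empty) open segment
lemma pvFlatMap_close (segs : List (List String)) (seg : List String) :
    ((if seg ≠ [] then segs ++ [seg] else segs).flatMap pvPieces)
      = segs.flatMap pvPieces ++ pvPieces seg := by
  by_cases hs : seg = []
  · simp [hs, pvPieces_nil]
  · simp [hs]

-- the loop invariant tying A's (chunks, current_chunk) to B's (segments, seg):
-- `done` is the list of full 151-line blocks A has already flushed out of the
-- segment B is still collecting.
def pvInv (cs cur : List String) (segs : List (List String)) (seg : List String) : Prop :=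
  ∃ done : List (List String),
    (∀ b ∈ done, b.length = 151) ∧
    seg = done.flatten ++ cur ∧
    cur.length ≤ 150 ∧
    cs = segs.flatMap pvPieces ++ done.map pvJoin

lemma pvInv_step (cs cur : List String) (segs : List (List String)) (seg : List String)
    (line : String) (h : pvInv cs cur segs seg) :
    pvInv (pvStepA (cs, cur) line).1 (pvStepA (cs, cur) line).2
          (pvStepB (segs, seg) line).1 (pvStepB (segs, seg) line).2 := by
  obtain ⟨done, hlen, hseg, hcur, hcs⟩ := h
  by_cases hb : pvBoundary line = true
  · -- boundary line: both sides close the current segment/chunk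
    have hB : pvStepB (segs, seg) line = ((if seg ≠ [] then segs ++ [seg] else segs), [line]) := by
      simp [pvStepB, hb]
    have hA : pvStepA (cs, cur) line
        = ((if cur ≠ [] then cs ++ [pvJoin cur] else cs), [line]) := by
      by_cases hc : cur = [] <;> simp [pvStepA, hb, hc]
    rw [hA, hB]
    refine ⟨[], by simp, by simp, by simp, ?_⟩
    rw [pvFlatMap_close, hseg, pvPieces_flatten done hlen cur, pvPieces_small cur hcur]
    by_cases hc : cur = [] <;> simp [hc, hcs]
  · -- ordinary line: appended to the open chunk/segment
    have hB : pvStepB (segs, seg) line = (segs, seg ++ [line]) := by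
      simp [pvStepB, hb]
    by_cases hfull : (cur ++ [line]).length > 150
    · -- A flushes a full 151-line block
      have h151 : (cur ++ [line]).length = 151 := by simp at hfull ⊢; omega
      have h150 : cur.length = 150 := by simp at h151; omega
      have hA : pvStepA (cs, cur) line = (cs ++ [pvJoin (cur ++ [line])], []) := by
        simp only [pvStepA, hb]
        simp
        omega
      rw [hA, hB]
      refine ⟨done ++ [cur ++ [line]], ?_, ?_, by simp, ?_⟩
      · intro x hx
        rcases List.mem_append.mp hx with h' | h'
        · exact hlen x h'
        · simp at h'; simp [h', h151]
      · simp [hseg]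
      · simp [hcs]
    · have hlt : cur.length < 150 := by simp at hfull; omega
      have hA : pvStepA (cs, cur) line = (cs, cur ++ [line]) := by
        simp only [pvStepA, hb]
        simp
        omega
      rw [hA, hB]
      refine ⟨done, hlen, by simp [hseg], ?_, hcs⟩
      simp at hfull ⊢; omega

lemma pvMain (lines : List String) : ∀ (cs cur : List String)
    (segs : List (List String)) (seg : List String), pvInv cs cur segs seg →
    (if (lines.foldl pvStepA (cs, cur)).2 ≠ []
       then (lines.foldl pvStepA (cs, cur)).1 ++ [pvJoin (lines.foldl pvStepA (cs, cur)).2]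
       else (lines.foldl pvStepA (cs, cur)).1)
      = ((if (lines.foldl pvStepB (segs, seg)).2 ≠ []
            then (lines.foldl pvStepB (segs, seg)).1 ++ [(lines.foldl pvStepB (segs, seg)).2]
            else (lines.foldl pvStepB (segs, seg)).1).flatMap pvPieces) := by
  induction lines with
  | nil =>
    intro cs cur segs seg h
    obtain ⟨done, hlen, hseg, hcur, hcs⟩ := h
    rw [List.foldl_nil, List.foldl_nil]
    rw [pvFlatMap_close, hseg, pvPieces_flatten done hlen cur, pvPieces_small cur hcur]
    by_cases hc : cur = [] <;> simp [hc, hcs]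
  | cons l t ih =>
    intro cs cur segs seg h
    rw [List.foldl_cons, List.foldl_cons]
    have h2 := pvInv_step cs cur segs seg l h
    rcases e1 : pvStepA (cs, cur) l with ⟨a1, a2⟩
    rcases e2 : pvStepB (segs, seg) l with ⟨b1, b2⟩
    rw [e1, e2] at h2
    exact ih a1 a2 b1 b2 h2

-- ===== VERDICT (by name: the statement is the Claim_ definition above) =====
theorem strategy_code_py_spec : Claim_equal_strategy_code_py := by
  intro text _
  unfold Spec_strategy_code_py strategy_code_py strategy_code_py_alt
  exact pvMain ((PySem.Str.split? text "\n").getD []) [] [] [] []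
    ⟨[], by simp, by simp, by simp, by simp⟩
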